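-- pv_equiv track=rewrite | github.com/Sherman-1/Elongates | utils/process.py | count_dashes
-- ===== SOURCE A (Python) =====
-- def count_dashes(string,reverse = False):
--
--     """
--     Count the number of dashes "-" on N-ter and C-ter ( 3' 5' )
--
--     Args:
--     --------
--         string (str): The input string
--         reverse (bool, optional): If True, count dashes from the end of the string. Defaults to False.
--
--     Returns:
--     --------
--         int: The number of dashes at the N-ter or C-ter of the input string.
--
--     Why do we need this function ?:
--     --------
--
--         In MUSCLE alignment format, dashes "-" are used to represent gaps in the alignment.
--         In our case, we want to count the number of dashes at the N-ter or C-ter of the sequences to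
--         determine the length of the N-ter or C-ter elongation for the other sequences.
--
--         YYYYYYYYY-----
--         YYYYYYYYYYYYYY
--
--         In this example, our goal is to retrieve the Cter elongation of the second sequence. To compute it, we first
--         need to count the number of dashes at the N-ter of the OTHER sequence.
--
--     """
--
--     count = 0
--     i = 0
--     if reverse == True : string = string[::-1]
--
--     while i < len(string) and string[i] == "-":
--         count += 1
--         i += 1
--     return count
-- ===== SOURCE B (Python) =====
-- def count_dashes(string, reverse=False):
--     if reverse == True:
--         return len(string) - len(string.rstrip('-'))
--     return len(string) - len(string.lstrip('-'))
-- ===== Notes on version B (the rewrite author's own statement) =====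
-- stated objective: idiomatic
-- what changed: Replaces the index-based while loop (plus the slice reversal in the reverse case) with a closed-form length difference against the string with its leading (or trailing) dashes stripped, with no explicit scan or string reversal.
import Mathlib
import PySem

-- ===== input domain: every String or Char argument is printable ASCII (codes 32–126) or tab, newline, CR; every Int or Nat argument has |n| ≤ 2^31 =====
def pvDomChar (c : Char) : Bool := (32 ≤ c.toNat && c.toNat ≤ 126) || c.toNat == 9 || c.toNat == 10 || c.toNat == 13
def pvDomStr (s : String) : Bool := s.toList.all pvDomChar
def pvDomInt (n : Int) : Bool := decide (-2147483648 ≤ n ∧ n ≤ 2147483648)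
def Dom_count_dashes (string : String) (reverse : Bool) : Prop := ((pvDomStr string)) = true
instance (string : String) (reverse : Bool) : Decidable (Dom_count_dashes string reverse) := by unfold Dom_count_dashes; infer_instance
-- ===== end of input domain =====

-- B replaces A's index loop (and the [::-1] reversal) by the closed-form length difference
-- against lstrip/rstrip('-'); return values proved equal on all inputs.

-- ===== PORT A =====
-- the while loop 'while i < len(s) and s[i] == "-": count += 1; i += 1' as structural recursion
def countDashLoop : List Char → Int
  | [] => 0
  | c :: cs => if c == '-' then 1 + countDashLoop cs else 0

def count_dashes (string : String) (reverse : Bool) : Int :=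
  -- if reverse == True: string = string[::-1]  (s[::-1] = reversal, exact)
  let s := if reverse = true then String.ofList string.toList.reverse else string
  countDashLoop s.toList

-- ===== PORT B =====
def count_dashes_alt (string : String) (reverse : Bool) : Int :=
  if reverse = true then
    -- len(string) - len(string.rstrip('-')); rstrip('-') drops trailing '-' (exact, hand-ported)
    (string.toList.length : Int) - ((string.toList.reverse.dropWhile (· == '-')).reverse.length : Int)
  else
    -- len(string) - len(string.lstrip('-')); lstrip('-') drops leading '-' (exact, hand-ported)
    (string.toList.length : Int) - ((string.toList.dropWhile (· == '-')).length : Int)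

-- ===== PRECondition & SPEC =====
def Spec_count_dashes (string : String) (reverse : Bool) (out : Int) : Prop := out = count_dashes_alt string reverse
instance (string : String) (reverse : Bool) (out : Int) : Decidable (Spec_count_dashes string reverse out) := by unfold Spec_count_dashes; infer_instance

-- ===== CLAIM (what is proved, stated in full; the proofs are below) =====
def Claim_equal_count_dashes : Prop := ∀ (string : String) (reverse : Bool), Dom_count_dashes string reverse → Spec_count_dashes string reverse (count_dashes string reverse)

-- ===== LEMMAS AND PROOFS =====
theorem countDashLoop_eq (l : List Char) :
    countDashLoop l = (l.length : Int) - ((l.dropWhile (· == '-')).length : Int) := by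
  induction l with
  | nil => simp [countDashLoop]
  | cons c cs ih =>
      by_cases h : c = '-'
      · simp [countDashLoop, List.dropWhile, h, ih]; omega
      · have hb : (c == '-') = false := by simp [h]
        simp [countDashLoop, hb, List.dropWhile]

-- ===== VERDICT (by name: the statement is the Claim_ definition above) =====
theorem count_dashes_spec : Claim_equal_count_dashes := by
  intro s r _
  unfold Spec_count_dashes count_dashes count_dashes_alt
  cases r with
  | false => simpa using countDashLoop_eq s.toList
  | true => simpa [String.toList_ofList] using countDashLoop_eq s.toList.reverse
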